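-- pv_equiv track=rewrite | github.com/den1s0v/rus-term | definition_pattern.py | full_comb
-- ===== SOURCE A (Python) =====
-- def full_comb(k, items):
--     """ Полная перестановка n^k вариантов, где n = len(items) """
--     assert k>0 and items
--     items = list(items)
--     n = len(items)
--     if k == 1:
--         return [(x,) for x in items]
--     else:
--         res_list = []
--         tails = full_comb(k-1, items)
--         for x in items:
--             for t in tails:
--                 res_list.append((x, *t))
--         return res_list
-- ===== SOURCE B (Python) =====
-- def full_comb(k, items):
--     """ Полная перестановка n^k вариантов, где n = len(items) """
--     assert k > 0 and items
--     items = list(items)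
--     res = [()]
--     for _ in range(k):
--         res = [t + (x,) for t in res for x in items]
--     return res
-- ===== Notes on version B (the rewrite author's own statement) =====
-- stated objective: alternative
-- what changed: Replaces the top-down recursion (prepending an item to every tail of full_comb(k-1)) with a bottom-up iterative product: start from [()], loop k times extending every partial tuple at the right end, which reproduces the same lexicographic order without recursion.
import Mathlib
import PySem

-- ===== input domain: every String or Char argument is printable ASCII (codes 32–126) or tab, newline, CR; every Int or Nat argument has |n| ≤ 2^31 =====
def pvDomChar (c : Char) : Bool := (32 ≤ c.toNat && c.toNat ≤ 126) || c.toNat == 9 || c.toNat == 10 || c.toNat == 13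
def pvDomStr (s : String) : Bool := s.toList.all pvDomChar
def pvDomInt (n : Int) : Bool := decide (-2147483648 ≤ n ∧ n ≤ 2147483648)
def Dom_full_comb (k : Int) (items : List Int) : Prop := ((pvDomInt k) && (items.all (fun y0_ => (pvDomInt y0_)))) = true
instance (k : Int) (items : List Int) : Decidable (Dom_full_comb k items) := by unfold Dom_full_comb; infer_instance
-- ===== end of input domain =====

-- B replaces A's top-down recursion with a bottom-up iterative product (same order, same cost).
-- Python tuples are ported as List Int.

-- ===== PORT A =====
-- A's recursion on k, transcribed with k as a Nat fuel (Pre_ guarantees k > 0; the 0 case is dead).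
def fullCombGoA (items : List Int) : Nat → List (List Int)
  | 0 => []
  | 1 => items.map (fun x => [x])
  | (n+2) =>
      let tails := fullCombGoA items (n+1)
      items.foldl (fun res x => tails.foldl (fun r t => r ++ [x :: t]) res) []

def full_comb (k : Int) (items : List Int) : List (List Int) :=
  fullCombGoA items k.toNat

-- ===== PORT B =====
-- one pass of B's loop body: res = [t + (x,) for t in res for x in items]
def fullCombStep (items : List Int) (res : List (List Int)) : List (List Int) :=
  res.flatMap (fun t => items.map (fun x => t ++ [x]))

def fullCombGoB (items : List Int) : Nat → List (List Int) → List (List Int)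
  | 0, res => res
  | (n+1), res => fullCombGoB items n (fullCombStep items res)

def full_comb_alt (k : Int) (items : List Int) : List (List Int) :=
  fullCombGoB items k.toNat [[]]

-- ===== PRECONDITION & SPEC =====
-- Pre_ is exactly A's `assert k>0 and items` (AssertionError otherwise).
def Pre_full_comb (k : Int) (items : List Int) : Prop := 0 < k ∧ items ≠ []
instance (k : Int) (items : List Int) : Decidable (Pre_full_comb k items) := by unfold Pre_full_comb; infer_instance
def pvWitness_full_comb : Int × List Int := (2, [1, 2])

def Spec_full_comb (k : Int) (items : List Int) (out : List (List Int)) : Prop := out = full_comb_alt k items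
instance (k : Int) (items : List Int) (out : List (List Int)) : Decidable (Spec_full_comb k items out) := by unfold Spec_full_comb; infer_instance

-- ===== CLAIM (what is proved, stated in full; the proofs are below) =====
def Claim_equal_full_comb : Prop := ∀ (k : Int) (items : List Int), Dom_full_comb k items → Pre_full_comb k items → Spec_full_comb k items (full_comb k items)

-- ===== LEMMAS AND PROOFS =====

-- reference shape: all length-n tuples, first coordinate slowest
def tuplesC (items : List Int) : Nat → List (List Int)
  | 0 => [[]]
  | (n+1) => items.flatMap (fun x => (tuplesC items n).map (fun t => x :: t))

theorem foldl_append_map (f : List Int → List Int) :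
    ∀ (l : List (List Int)) (r : List (List Int)),
      l.foldl (fun r t => r ++ [f t]) r = r ++ l.map f := by
  intro l
  induction l with
  | nil => simp
  | cons a l ih => intro r; simp [ih]

theorem foldl_append_flatMap (g : Int → List (List Int)) :
    ∀ (l : List Int) (r : List (List Int)),
      l.foldl (fun r x => r ++ g x) r = r ++ l.flatMap g := by
  intro l
  induction l with
  | nil => simp
  | cons a l ih => intro r; simp [ih]

theorem goA_eq_tuples (items : List Int) :
    ∀ n, fullCombGoA items (n+1) = tuplesC items (n+1) := by
  intro n
  induction n with
  | zero => simp [fullCombGoA, tuplesC, List.map_eq_flatMap]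
  | succ m ih =>
      show fullCombGoA items (m+2) = tuplesC items (m+2)
      have h1 : ∀ (x : Int) (r : List (List Int)),
          (fullCombGoA items (m+1)).foldl (fun r t => r ++ [x :: t]) r
            = r ++ (fullCombGoA items (m+1)).map (fun t => x :: t) := by
        intro x r; exact foldl_append_map (fun t => x :: t) _ r
      simp only [fullCombGoA]
      simp only [h1]
      rw [foldl_append_flatMap (fun x => (fullCombGoA items (m+1)).map (fun t => x :: t)) items []]
      simp [ih, tuplesC]

theorem step_tuples (items : List Int) :
    ∀ n, fullCombStep items (tuplesC items n) = tuplesC items (n+1) := by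
  intro n
  induction n with
  | zero => simp [fullCombStep, tuplesC, List.map_eq_flatMap]
  | succ m ih =>
      show fullCombStep items (tuplesC items (m+1)) = tuplesC items (m+2)
      have lhs : fullCombStep items (tuplesC items (m+1))
          = items.flatMap (fun x => (fullCombStep items (tuplesC items m)).map (fun t => x :: t)) := by
        simp [fullCombStep, tuplesC, List.map_flatMap, List.map_map, Function.comp_def,
          List.flatMap_assoc, List.flatMap_map]
      rw [lhs, ih]
      rfl

theorem goB_tuples (items : List Int) :
    ∀ n m, fullCombGoB items n (tuplesC items m) = tuplesC items (m + n) := by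
  intro n
  induction n with
  | zero => intro m; simp [fullCombGoB]
  | succ p ih =>
      intro m
      show fullCombGoB items p (fullCombStep items (tuplesC items m)) = tuplesC items (m + (p+1))
      rw [step_tuples, ih]
      congr 1
      omega

-- ===== VERDICT (by name: the statement is the Claim_ definition above) =====
theorem full_comb_spec : Claim_equal_full_comb := by
  intro k items _ hpre
  unfold Spec_full_comb full_comb full_comb_alt
  obtain ⟨hk, -⟩ := hpre
  obtain ⟨n, hn⟩ : ∃ n, k.toNat = n + 1 := by
    refine ⟨k.toNat - 1, ?_⟩; omega
  have hB : fullCombGoB items k.toNat [[]] = tuplesC items k.toNat := by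
    have := goB_tuples items k.toNat 0
    simpa [tuplesC] using this
  rw [hn, goA_eq_tuples, ← hn, hB, hn]
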